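-- pv_equiv track=rewrite | github.com/EdsonEddy/scsc | notebooks/datasets/large/773003.py | calcular_sucesion
-- ===== SOURCE A (Python) =====
-- def calcular_sucesion(n):
--     base_inicio = 1
--     suma_anterior = 0
--     resultado = []
--     for i in range(1, n + 1):
--
--         num_elementos = 2 * i - 1
--         suma_actual = sum(range(base_inicio, base_inicio + num_elementos))
--         potencia_actual = i ** 3
--
--         if i == 1:
--             resultado.append("1")
--         else:
--             resultado.append(f"{suma_anterior}+{potencia_actual}")
--
--         base_inicio += num_elementos
--         suma_anterior = potencia_actual
--     return resultado
-- ===== SOURCE B (Python) =====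
-- def calcular_sucesion(n):
--     resultado = []
--     for i in range(1, n + 1):
--         if i == 1:
--             resultado.append("1")
--         else:
--             resultado.append(f"{(i - 1) ** 3}+{i ** 3}")
--     return resultado
-- ===== Notes on version B (the rewrite author's own statement) =====
-- stated objective: faster
-- what changed: Dropped all carried loop state (base_inicio, suma_anterior and the dead sum(range(...)) computation): each element is computed in closed form from i alone as f"{(i-1)**3}+{i**3}".
import Mathlib
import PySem

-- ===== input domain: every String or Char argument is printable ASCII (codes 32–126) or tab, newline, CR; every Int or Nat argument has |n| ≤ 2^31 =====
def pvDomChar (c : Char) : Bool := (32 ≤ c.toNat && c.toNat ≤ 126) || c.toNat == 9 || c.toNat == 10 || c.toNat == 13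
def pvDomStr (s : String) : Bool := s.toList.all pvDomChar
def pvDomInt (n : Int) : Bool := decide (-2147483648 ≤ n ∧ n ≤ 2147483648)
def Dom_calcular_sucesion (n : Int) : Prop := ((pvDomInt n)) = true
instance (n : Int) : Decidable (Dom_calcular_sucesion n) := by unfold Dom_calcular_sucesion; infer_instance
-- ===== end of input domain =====

-- B drops A's carried state (base_inicio, suma_anterior, dead sum) and computes each term
-- in closed form from i, turning A's O(n^2) loop into an O(n) one.

-- ===== PORT A =====
-- loop body of A: state = (base_inicio, suma_anterior, resultado)
def pvStepA (st : Int × Int × List String) (i : Int) : Int × Int × List String :=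
  let num_elementos := 2 * i - 1
  let _suma_actual := (PySem.List.pyRange st.1 (st.1 + num_elementos) 1).sum  -- dead in A too
  let potencia_actual := i ^ 3
  let resultado :=
    if i == 1 then st.2.2 ++ ["1"]
    else st.2.2 ++ [PySem.Int.toStr st.2.1 ++ "+" ++ PySem.Int.toStr potencia_actual]
  (st.1 + num_elementos, potencia_actual, resultado)

def calcular_sucesion (n : Int) : List String :=
  ((PySem.List.pyRange 1 (n + 1) 1).foldl pvStepA (1, 0, [])).2.2

-- ===== PORT B =====
-- loop body of B: stateless per-element computation
def pvStepB (resultado : List String) (i : Int) : List String :=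
  if i == 1 then resultado ++ ["1"]
  else resultado ++ [PySem.Int.toStr ((i - 1) ^ 3) ++ "+" ++ PySem.Int.toStr (i ^ 3)]

def calcular_sucesion_alt (n : Int) : List String :=
  (PySem.List.pyRange 1 (n + 1) 1).foldl pvStepB []

-- ===== PRECONDITION & SPEC =====
def Spec_calcular_sucesion (n : Int) (out : List String) : Prop := out = calcular_sucesion_alt n
instance (n : Int) (out : List String) : Decidable (Spec_calcular_sucesion n out) := by unfold Spec_calcular_sucesion; infer_instance

-- ===== CLAIM (what is proved, stated in full; the proofs are below) =====
def Claim_equal_calcular_sucesion : Prop := ∀ (n : Int), Dom_calcular_sucesion n → Spec_calcular_sucesion n (calcular_sucesion n)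

-- ===== LEMMAS AND PROOFS =====

-- invariant: after the first k iterations A's state is (k^2+1, k^3 (or 0), B's list)
theorem pv_inv (k : Nat) :
    (PySem.List.pyRange 1 (1 + (k : Int)) 1).foldl pvStepA (1, 0, []) =
      ((k : Int) ^ 2 + 1, (if k = 0 then 0 else (k : Int) ^ 3),
        (PySem.List.pyRange 1 (1 + (k : Int)) 1).foldl pvStepB []) := by
  induction k with
  | zero => simp [PySem.List.pyRange_one_eq_nil]
  | succ k ih =>
    have h1 : (1 : Int) ≤ 1 + (k : Int) := by omega
    have hsplit : PySem.List.pyRange 1 (1 + ((k + 1 : Nat) : Int)) 1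
        = PySem.List.pyRange 1 (1 + (k : Int)) 1 ++ [1 + (k : Int)] := by
      have : (1 + ((k + 1 : Nat) : Int)) = (1 + (k : Int)) + 1 := by push_cast; ring
      rw [this, PySem.List.pyRange_one_succ_right h1]
    rw [hsplit, List.foldl_append, List.foldl_append, ih]
    simp only [List.foldl_cons, List.foldl_nil]
    rcases Nat.eq_zero_or_pos k with hk | hk
    · subst hk; simp [pvStepA, pvStepB]
    · have hne : ¬ ((1 + (k : Int)) == 1) := by
        simp; omega
      have hk1 : (k + 1 : Nat) ≠ 0 := by omega
      have hk0 : k ≠ 0 := by omega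
      simp only [pvStepA, pvStepB, hne, if_neg hk0, if_neg hk1, Bool.false_eq_true, if_false]
      refine Prod.ext ?_ (Prod.ext ?_ ?_)
      · push_cast; ring
      · push_cast; ring
      · have h2 : (1 + (k : Int)) - 1 = (k : Int) := by ring
        simp [h2]

-- ===== VERDICT (by name: the statement is the Claim_ definition above) =====
theorem calcular_sucesion_spec : Claim_equal_calcular_sucesion := by
  intro n _
  unfold Spec_calcular_sucesion calcular_sucesion calcular_sucesion_alt
  by_cases h : n ≤ 0
  · rw [PySem.List.pyRange_one_eq_nil (by omega)]; rfl
  · have hn : n + 1 = 1 + (n.toNat : Int) := by omega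
    rw [hn, pv_inv]
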